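-- pv_equiv track=rewrite | github.com/shoark7/algorithm-with-python | problems_solving/kakao/filename_merge.py | is_a_first
-- ===== SOURCE A (Python) =====
-- def is_a_first(a, b, names):
--
--     def divide_name(name):
--         i = 0
--         head = num = tail = ''
--
--         while not name[i].isnumeric():
--             head += name[i]
--             i += 1
--
--         while name[i:i+1].isnumeric() and len(num) != 5:
--             num += name[i]
--             i += 1
--
--         tail = name[i:]
--         return head, num, tail
--
--     a_parts = divide_name(a)
--     b_parts = divide_name(b)
--
--     # head
--     if a_parts[0].upper() < b_parts[0].upper():
--         return True
--     elif a_parts[0].upper() > b_parts[0].upper():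
--         return False
--
--     # num
--     if int(a_parts[1]) < int(b_parts[1]):
--         return True
--     elif int(a_parts[1]) > int(b_parts[1]):
--         return False
--
--     # original order
--     return names.index(a) < names.index(b)
-- ===== SOURCE B (Python) =====
-- def is_a_first(a, b, names):
--     # One merged scan of both names up to their numbers: decide the case-insensitive
--     # head comparison on the fly (first difference wins) while still walking each
--     # name to its number, then compare the numbers, then the original order.
--     i = j = 0
--     head_cmp = None
--     while True:
--         ad = a[i].isdigit()
--         bd = b[j].isdigit()
--         if ad and bd:
--             break
--         if head_cmp is None:
--             if ad or bd:
--                 head_cmp = ad          # the shorter head is a strict prefix, hence smaller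
--             else:
--                 ua, ub = a[i].upper(), b[j].upper()
--                 if ua != ub:
--                     head_cmp = ua < ub
--         if not ad:
--             i += 1
--         if not bd:
--             j += 1
--     if head_cmp is not None:
--         return head_cmp
--
--     def num(s, p):
--         q = p
--         while q < len(s) and q - p < 5 and s[q].isdigit():
--             q += 1
--         return int(s[p:q])
--
--     na, nb = num(a, i), num(b, j)
--     if na != nb:
--         return na < nb
--     return names.index(a) < names.index(b)
-- ===== Notes on version B (the rewrite author's own statement) =====
-- stated objective: alternative
-- what changed: B replaces A's parse-both-names-into-(head,num,tail)-then-cascade-compare with one merged scan that walks both strings in lockstep up to their numbers, accumulating the case-insensitive head comparison at the first differing character instead of materialising and comparing head strings, then compares the numbers and falls back to names.index only on a full tie.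
import Mathlib
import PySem

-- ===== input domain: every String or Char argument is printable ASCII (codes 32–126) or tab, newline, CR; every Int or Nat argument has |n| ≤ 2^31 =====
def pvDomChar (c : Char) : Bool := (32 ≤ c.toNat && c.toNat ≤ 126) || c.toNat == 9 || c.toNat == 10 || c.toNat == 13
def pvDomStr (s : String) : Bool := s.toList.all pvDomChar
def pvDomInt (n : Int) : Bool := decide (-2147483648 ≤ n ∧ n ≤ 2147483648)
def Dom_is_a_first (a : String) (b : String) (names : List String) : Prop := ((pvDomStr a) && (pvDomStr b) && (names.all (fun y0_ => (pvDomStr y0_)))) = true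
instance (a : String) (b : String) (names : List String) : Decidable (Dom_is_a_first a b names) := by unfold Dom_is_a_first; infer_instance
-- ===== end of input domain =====

-- B replaces A's parse-both-names-then-cascade-compare by one merged scan of both strings that
-- decides the case-insensitive head comparison on the fly (first difference wins) while walking
-- each name to its number, then compares the numbers and finally the original order (objective: alternative).

-- ===== PORT A =====
-- `name[i].isnumeric()` is ported as PySem.Chars.isdigit, exact on the ASCII domain.
-- first while loop: accumulate `head` until a numeric char; running off the end = IndexError = none
def pvDivideLoop1 (head : List Char) (rest : List Char) : Option (List Char × List Char) :=
  match rest with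
  | [] => none
  | c :: cs => if PySem.Chars.isdigit c then some (head, c :: cs) else pvDivideLoop1 (head ++ [c]) cs

-- second while loop: accumulate up to 5 numeric chars into `num`
def pvDivideLoop2 (num : List Char) (rest : List Char) : List Char × List Char :=
  match rest with
  | [] => (num, [])
  | c :: cs => if PySem.Chars.isdigit c && num.length != 5 then pvDivideLoop2 (num ++ [c]) cs else (num, c :: cs)

def pvDivideName (name : List Char) : Option (List Char × List Char × List Char) :=
  match pvDivideLoop1 [] name with
  | none => none
  | some (head, rest) => some (head, (pvDivideLoop2 [] rest).1, (pvDivideLoop2 [] rest).2)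

-- Python A recomputes `a_parts[0].upper()` etc. at each comparison, so the port inlines them too
def is_a_first (a : String) (b : String) (names : List String) : Bool :=
  match pvDivideName a.toList, pvDivideName b.toList with
  | some (ha, na, _), some (hb, nb, _) =>
    if PySem.Chars.strLt (PySem.Chars.upper ha) (PySem.Chars.upper hb) then true
    else if PySem.Chars.strLt (PySem.Chars.upper hb) (PySem.Chars.upper ha) then false
    else
      match PySem.Int.ofChars? na, PySem.Int.ofChars? nb with
      | some x, some y =>
        if x < y then true
        else if y < x then false
        else
          match PySem.List.index? names a, PySem.List.index? names b with
          | some i, some j => decide (i < j)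
          | _, _ => false              -- ValueError: a or b not in names (excluded by Pre_)
      | _, _ => false                  -- ValueError from int('') (unreachable when a digit exists)
  | _, _ => false                      -- IndexError: no digit in a or b (excluded by Pre_)

-- ===== PORT B =====
-- the merged `while True` scan: ra, rb are the rests of a, b from indices i, j and res is
-- head_cmp; stops when both rests start with a digit; none = IndexError on a[i] or b[j]
def pvScan (ra : List Char) (rb : List Char) (res : Option Bool) :
    Option (Option Bool × List Char × List Char) :=
  match ra, rb with
  | [], _ => none
  | _ :: _, [] => none
  | ca :: as_, cb :: bs =>
    let ad := PySem.Chars.isdigit ca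
    let bd := PySem.Chars.isdigit cb
    if ad && bd then some (res, ca :: as_, cb :: bs)
    else
      let res' :=
        match res with
        | some r => some r
        | none =>
          if ad || bd then some ad
          else if [PySem.Chars.upperChar ca] ≠ [PySem.Chars.upperChar cb] then
            some (PySem.Chars.strLt [PySem.Chars.upperChar ca] [PySem.Chars.upperChar cb])
          else none
      -- `if not ad: i += 1` / `if not bd: j += 1`: drop the non-digit fronts
      if ad then pvScan (ca :: as_) bs res'
      else if bd then pvScan as_ (cb :: bs) res'
      else pvScan as_ bs res'
  termination_by ra.length + rb.length
  decreasing_by all_goals simp <;> omega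

-- `while q < len(s) and q - p < 5 and s[q].isdigit(): q += 1`, over rest = s[p:], returning q - p
def pvNumLoop (n : Nat) (rest : List Char) : Nat :=
  match rest with
  | [] => n
  | c :: cs => if decide (n < 5) && PySem.Chars.isdigit c then pvNumLoop (n + 1) cs else n

def is_a_first_alt (a : String) (b : String) (names : List String) : Bool :=
  match pvScan a.toList b.toList none with
  | none => false                      -- IndexError: no digit in a or b (excluded by Pre_)
  | some (some r, _, _) => r           -- `if head_cmp is not None: return head_cmp`
  | some (none, ra, rb) =>
    -- num(a, i) / num(b, i): int of the ≤5-digit run at the current rests (int(s[p:q]))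
    match PySem.Int.ofChars? (ra.take (pvNumLoop 0 ra)) with
    | none => false                    -- ValueError from int('') (unreachable when a digit exists)
    | some na =>
      match PySem.Int.ofChars? (rb.take (pvNumLoop 0 rb)) with
      | none => false
      | some nb =>
        if na ≠ nb then decide (na < nb)
        else
          match PySem.List.index? names a with
          | none => false              -- ValueError: a not in names (excluded by Pre_)
          | some i =>
            match PySem.List.index? names b with
            | none => false            -- ValueError: b not in names (excluded by Pre_)
            | some j => decide (i < j)

-- ===== PRECONDITION & SPEC =====
-- spec-level parse of a filename: head = chars before the first digit, num = the first (at most 5) digits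
def pvHeadOf (cs : List Char) : List Char := cs.takeWhile (fun c => !PySem.Chars.isdigit c)
def pvNumOf (cs : List Char) : List Char :=
  ((cs.dropWhile (fun c => !PySem.Chars.isdigit c)).takeWhile PySem.Chars.isdigit).take 5

-- Pre_ excludes exactly the inputs where the Python raises: IndexError when a or b contains no
-- digit, and ValueError from names.index when the (head, num) keys tie but a or b is not in names.
-- The two `ofChars? ≠ none` conjuncts are automatically true whenever the name contains a digit
-- (int() of a nonempty run of at most 5 digits always succeeds), so they exclude no further input;
-- they are stated explicitly only so the file needs no totality lemma for PySem's int parser.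
def Pre_is_a_first (a : String) (b : String) (names : List String) : Prop :=
  a.toList.any PySem.Chars.isdigit = true ∧ b.toList.any PySem.Chars.isdigit = true ∧
  PySem.Int.ofChars? (pvNumOf a.toList) ≠ none ∧ PySem.Int.ofChars? (pvNumOf b.toList) ≠ none ∧
  ((PySem.Chars.upper (pvHeadOf a.toList) = PySem.Chars.upper (pvHeadOf b.toList) ∧
    PySem.Int.ofChars? (pvNumOf a.toList) = PySem.Int.ofChars? (pvNumOf b.toList)) →
    a ∈ names ∧ b ∈ names)
instance (a : String) (b : String) (names : List String) : Decidable (Pre_is_a_first a b names) := by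
  unfold Pre_is_a_first; infer_instance

def pvWitness_is_a_first : String × String × List String := ("img12.png", "IMG10.PNG", ["IMG10.PNG", "img12.png"])

def Spec_is_a_first (a : String) (b : String) (names : List String) (out : Bool) : Prop := out = is_a_first_alt a b names
instance (a : String) (b : String) (names : List String) (out : Bool) : Decidable (Spec_is_a_first a b names out) := by unfold Spec_is_a_first; infer_instance

-- ===== CLAIM (what is proved, stated in full; the proofs are below) =====
def Claim_equal_is_a_first : Prop := ∀ (a : String) (b : String) (names : List String), Dom_is_a_first a b names → Pre_is_a_first a b names → Spec_is_a_first a b names (is_a_first a b names)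

-- ===== LEMMAS AND PROOFS =====

theorem pvDivideLoop1_eq (cs : List Char) : ∀ acc : List Char, cs.any PySem.Chars.isdigit = true →
    pvDivideLoop1 acc cs =
      some (acc ++ cs.takeWhile (fun c => !PySem.Chars.isdigit c),
            cs.dropWhile (fun c => !PySem.Chars.isdigit c)) := by
  induction cs with
  | nil => intro acc h; simp at h
  | cons c cs ih =>
    intro acc h
    by_cases hc : PySem.Chars.isdigit c = true
    · simp [pvDivideLoop1, hc]
    · simp only [Bool.not_eq_true] at hc
      have h' : cs.any PySem.Chars.isdigit = true := by
        simp [List.any_cons, hc] at h; simpa using h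
      simp [pvDivideLoop1, hc, ih _ h']

theorem pvDivideLoop2_fst (cs : List Char) : ∀ num : List Char, num.length ≤ 5 →
    (pvDivideLoop2 num cs).1 = num ++ (cs.takeWhile PySem.Chars.isdigit).take (5 - num.length) := by
  induction cs with
  | nil => intro num _; simp [pvDivideLoop2]
  | cons c cs ih =>
    intro num hlen
    by_cases hc : PySem.Chars.isdigit c = true
    · by_cases h5 : num.length = 5
      · simp [pvDivideLoop2, hc, h5]
      · have hlt : num.length + 1 ≤ 5 := by omega
        have hrec := ih (num ++ [c]) (by simpa using hlt)
        have harith : 5 - num.length = (5 - (num ++ [c]).length) + 1 := by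
          simp only [List.length_append, List.length_cons, List.length_nil]; omega
        simp only [pvDivideLoop2]
        rw [if_pos (by simp [hc, h5]), hrec, List.takeWhile_cons, if_pos hc, harith,
          List.take_succ_cons]
        simp
    · simp only [Bool.not_eq_true] at hc
      simp [pvDivideLoop2, hc]

-- characterisation of A's divide_name on inputs containing a digit (the tail is irrelevant to A)
theorem pvDivideName_eq (name : List Char) (h : name.any PySem.Chars.isdigit = true) :
    pvDivideName name = some (pvHeadOf name, pvNumOf name,
      (pvDivideLoop2 [] (name.dropWhile (fun c => !PySem.Chars.isdigit c))).2) := by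
  unfold pvDivideName
  rw [pvDivideLoop1_eq name [] h]
  have h2 := pvDivideLoop2_fst (name.dropWhile (fun c => !PySem.Chars.isdigit c)) [] (by simp)
  simp only [List.nil_append, List.length_nil, Nat.sub_zero] at h2
  simp [pvHeadOf, pvNumOf, h2]

-- case lemmas for Python's string `<` (strLt) used by the streaming argument
theorem pvStrLt_nil_cons (c : Char) (l : List Char) : PySem.Chars.strLt [] (c :: l) = true := by
  simp [PySem.Chars.strLt]

theorem pvStrLt_nil_right (s : List Char) : PySem.Chars.strLt s [] = false := by
  simp [PySem.Chars.strLt]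

theorem pvStrLt_cons_cons (a b : Char) (s t : List Char) : PySem.Chars.strLt (a :: s) (b :: t) =
    (if a < b then true else if b < a then false else PySem.Chars.strLt s t) := by
  simp only [PySem.Chars.strLt, List.cons_lt_cons_iff]
  split_ifs with h1 h2
  · simp [h1]
  · simp only [decide_eq_false_iff_not, not_or, not_and]
    exact ⟨fun h => absurd h h1, fun h => absurd h (LT.lt.ne' h2)⟩
  · have hab : a = b := le_antisymm (not_lt.mp h2) (not_lt.mp h1)
    subst hab
    simp

theorem pvUpper_cons (c : Char) (l : List Char) :
    PySem.Chars.upper (c :: l) = PySem.Chars.upperChar c :: PySem.Chars.upper l := by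
  simp [PySem.Chars.upper]

-- the head comparison B accumulates: A's double strLt test on the uppercased heads
def pvHeadRes (ra rb : List Char) : Option Bool :=
  if PySem.Chars.strLt (PySem.Chars.upper (pvHeadOf ra)) (PySem.Chars.upper (pvHeadOf rb)) then
    some true
  else if PySem.Chars.strLt (PySem.Chars.upper (pvHeadOf rb)) (PySem.Chars.upper (pvHeadOf ra)) then
    some false
  else none

-- B's merged scan keeps an already-made decision, else decides A's head comparison,
-- and stops at the first digit of each string
theorem pvScan_eq (n : Nat) : ∀ (ra rb : List Char) (res : Option Bool),
    ra.length + rb.length ≤ n →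
    ra.any PySem.Chars.isdigit = true → rb.any PySem.Chars.isdigit = true →
    pvScan ra rb res = some (res.or (pvHeadRes ra rb),
      ra.dropWhile (fun c => !PySem.Chars.isdigit c),
      rb.dropWhile (fun c => !PySem.Chars.isdigit c)) := by
  induction n with
  | zero =>
    intro ra rb res hlen ha _
    match ra with
    | [] => simp at ha
    | c :: cs => simp at hlen
  | succ n ih =>
    intro ra rb res hlen ha hb
    match ra, rb with
    | [], _ => simp at ha
    | ca :: as_, [] => simp at hb
    | ca :: as_, cb :: bs =>
      by_cases had : PySem.Chars.isdigit ca = true <;>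
        by_cases hbd : PySem.Chars.isdigit cb = true
      · rw [pvScan.eq_def]
        simp [had, hbd, pvHeadRes, pvHeadOf, PySem.Chars.upper, pvStrLt_nil_right]
      · simp only [Bool.not_eq_true] at hbd
        have hb' : bs.any PySem.Chars.isdigit = true := by
          simp [List.any_cons, hbd] at hb; simpa using hb
        have ha' : (ca :: as_).any PySem.Chars.isdigit = true := ha
        rw [pvScan.eq_def]
        simp only [had, hbd, Bool.and_false, Bool.true_or, if_true]
        rw [ih (ca :: as_) bs _ (by simp at hlen ⊢; omega) ha' hb']
        cases res <;>
          simp [pvHeadOf, pvHeadRes, had, hbd, PySem.Chars.upper,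
            pvStrLt_nil_right, pvStrLt_nil_cons]
      · simp only [Bool.not_eq_true] at had
        have ha' : as_.any PySem.Chars.isdigit = true := by
          simp [List.any_cons, had] at ha; simpa using ha
        rw [pvScan.eq_def]
        simp only [had, hbd, Bool.and_true, Bool.or_true, if_true]
        rw [ih as_ (cb :: bs) _ (by simp at hlen ⊢; omega) ha' hb]
        cases res <;>
          simp [pvHeadOf, pvHeadRes, had, hbd, PySem.Chars.upper,
            pvStrLt_nil_right, pvStrLt_nil_cons]
      · simp only [Bool.not_eq_true] at had hbd
        have ha' : as_.any PySem.Chars.isdigit = true := by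
          simp [List.any_cons, had] at ha; simpa using ha
        have hb' : bs.any PySem.Chars.isdigit = true := by
          simp [List.any_cons, hbd] at hb; simpa using hb
        have hdrop : pvHeadRes (ca :: as_) (cb :: bs) =
            (if [PySem.Chars.upperChar ca] ≠ [PySem.Chars.upperChar cb] then
              some (PySem.Chars.strLt [PySem.Chars.upperChar ca] [PySem.Chars.upperChar cb])
            else pvHeadRes as_ bs) := by
          by_cases heq : PySem.Chars.upperChar ca = PySem.Chars.upperChar cb
          · simp only [pvHeadRes, pvHeadOf, List.takeWhile_cons, had, hbd, Bool.not_false,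
              if_true, pvUpper_cons, pvStrLt_cons_cons, heq, lt_irrefl, if_false]
            simp only [ne_eq, not_true_eq_false, if_false]
            split_ifs <;> rfl
          · rcases lt_trichotomy (PySem.Chars.upperChar ca) (PySem.Chars.upperChar cb)
              with hlt | hE | hgt
            · simp [pvHeadRes, pvHeadOf, had, hbd, pvUpper_cons, pvStrLt_cons_cons, heq,
                hlt, pvStrLt_cons_cons]
            · exact absurd hE heq
            · simp [pvHeadRes, pvHeadOf, had, hbd, pvUpper_cons, pvStrLt_cons_cons, heq,
                hgt, not_lt_of_gt hgt]
        rw [pvScan.eq_def]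
        simp only [had, hbd, Bool.and_false, Bool.or_false]
        rw [ih as_ bs _ (by simp at hlen ⊢; omega) ha' hb']
        cases res with
        | some r =>
          simp [hdrop, had, hbd]
        | none =>
          rw [hdrop]
          by_cases heq : PySem.Chars.upperChar ca = PySem.Chars.upperChar cb
          · simp [heq, had, hbd]
          · simp [heq, had, hbd]

-- B's num loop takes exactly the first (at most 5) digits of the rest
theorem pvNumLoop_eq (rest : List Char) : ∀ n : Nat,
    pvNumLoop n rest = n + ((rest.takeWhile PySem.Chars.isdigit).take (5 - n)).length := by
  induction rest with
  | nil => intro n; simp [pvNumLoop]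
  | cons c cs ih =>
    intro n
    by_cases hc : PySem.Chars.isdigit c = true
    · by_cases h5 : n < 5
      · have harith : 5 - n = (5 - (n + 1)) + 1 := by omega
        simp only [pvNumLoop, hc, h5, decide_true, Bool.and_true, if_true, List.takeWhile_cons]
        rw [ih, harith, List.take_succ_cons]
        simp; omega
      · simp [pvNumLoop, hc, h5]
        omega
    · simp only [Bool.not_eq_true] at hc
      simp [pvNumLoop, hc]

theorem pvNumTake_eq (name : List Char) :
    (name.dropWhile (fun c => !PySem.Chars.isdigit c)).take
      (pvNumLoop 0 (name.dropWhile (fun c => !PySem.Chars.isdigit c))) = pvNumOf name := by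
  rw [pvNumLoop_eq]
  have hpre : pvNumOf name <+: name.dropWhile (fun c => !PySem.Chars.isdigit c) :=
    (List.take_prefix _ _).trans (List.takeWhile_prefix _)
  have := (List.prefix_iff_eq_take.mp hpre).symm
  simpa [pvNumOf] using this

-- A's two-scrutinee index match and B's nested one compute the same tie-breaker
theorem pvIdxEq (names : List String) (a b : String) :
    (match PySem.List.index? names a, PySem.List.index? names b with
     | some i, some j => decide (i < j)
     | _, _ => false)
    = (match PySem.List.index? names a with
       | none => false
       | some i =>
         match PySem.List.index? names b with
         | none => false
         | some j => decide (i < j)) := by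
  cases PySem.List.index? names a <;> cases PySem.List.index? names b <;> rfl

-- A's int cascade computes B's `if na != nb` comparison with the tie-breaker E
theorem pvIntCmp (x y : Int) (E : Bool) :
    (if x < y then true else if y < x then false else E)
      = (if x ≠ y then decide (x < y) else E) := by
  by_cases hxy : x = y
  · subst hxy; simp
  · rcases lt_or_gt_of_ne hxy with h | h
    · simp [h, hxy]
    · simp [h, not_lt_of_gt h, hxy]

-- ===== VERDICT (by name: the statement is the Claim_ definition above) =====
theorem is_a_first_spec : Claim_equal_is_a_first := by
  intro a b names _ hpre
  obtain ⟨ha, hb, hia, hib, -⟩ := hpre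
  unfold Spec_is_a_first is_a_first is_a_first_alt
  rw [pvDivideName_eq a.toList ha, pvDivideName_eq b.toList hb,
    pvScan_eq (a.toList.length + b.toList.length) a.toList b.toList none le_rfl ha hb]
  simp only [Option.none_or]
  by_cases h1 : PySem.Chars.strLt (PySem.Chars.upper (pvHeadOf a.toList))
      (PySem.Chars.upper (pvHeadOf b.toList)) = true
  · simp [h1, pvHeadRes]
  · by_cases h2 : PySem.Chars.strLt (PySem.Chars.upper (pvHeadOf b.toList))
        (PySem.Chars.upper (pvHeadOf a.toList)) = true
    · simp [h1, h2, pvHeadRes]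
    · rw [Bool.not_eq_true] at h1 h2
      simp only [pvHeadRes, h1, h2, Bool.false_eq_true, if_false]
      rw [pvNumTake_eq a.toList, pvNumTake_eq b.toList]
      cases hx : PySem.Int.ofChars? (pvNumOf a.toList) with
      | none => exact absurd hx hia
      | some x =>
        cases hy : PySem.Int.ofChars? (pvNumOf b.toList) with
        | none => exact absurd hy hib
        | some y =>
          refine (pvIntCmp x y _).trans ?_
          by_cases hne : x ≠ y
          · simp [hne]
          · simp only [hne, if_false]
            exact pvIdxEq names a b
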